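-- pv_equiv track=rewrite | github.com/hexdek-labs/HexDek | scripts/analyze_utils/signatures.py | classify_seat
-- ===== SOURCE A (Python) =====
-- _ARCHETYPE_RULES = [
--     # (archetype_label, min_matches, set_of_marker_cards)
--     ("storm", 1, {
--         "Grapeshot", "Tendrils of Agony", "Brain Freeze",
--         "Empty the Warrens", "Aetherflux Reservoir",
--         "Storm-Kiln Artist",
--     }),
--     ("cedh_turbo", 2, {
--         "Thassa's Oracle", "Demonic Consultation", "Tainted Pact",
--         "Ad Nauseam", "Dockside Extortionist",
--         "Dramatic Reversal", "Isochron Scepter",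
--     }),
--     ("artifact_ramp", 3, {
--         "Sol Ring", "Mana Crypt", "Mana Vault",
--         "Chrome Mox", "Mox Amber", "Mox Opal", "Mox Diamond",
--         "Thran Dynamo", "Gilded Lotus", "Coalition Relic",
--         "Arcane Signet", "Fellwar Stone", "Mind Stone",
--     }),
--     ("recursion_graveyard", 1, {
--         "Muldrotha, the Gravetide", "Meren of Clan Nel Toth",
--         "Karador, Ghost Chieftain", "The Scarab God",
--         "Reanimate", "Animate Dead", "Necromancy",
--     }),
--     ("werewolf", 2, {
--         "Ulrich of the Krallenhorde", "Tovolar, Dire Overlord",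
--         "Arlinn Kord", "Kessig Wolf Run",
--         "Immerwolf", "Huntmaster of the Fells",
--     }),
--     ("voltron", 2, {
--         "Sword of Feast and Famine", "Sword of Fire and Ice",
--         "Umezawa's Jitte", "Shadowspear",
--         "Embercleave", "Colossus Hammer",
--     }),
--     ("aristocrats_drain", 2, {
--         "Blood Artist", "Zulaport Cutthroat",
--         "Cruel Celebrant", "Syr Konrad, the Grim",
--         "Bastion of Remembrance",
--     }),
-- ]
--
-- def classify_seat(card_names: list) -> str:
--     """Return the best-matching archetype label for a decklist."""
--     names = set(card_names)
--     best = ("unknown", 0)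
--     for label, thresh, markers in _ARCHETYPE_RULES:
--         hits = len(names & markers)
--         if hits >= thresh and hits > best[1]:
--             best = (label, hits)
--     return best[0]
-- ===== SOURCE B (Python) =====
-- # Flat inverted map: marker card name -> the (unique) archetype it marks.
-- _CARD_TO_LABEL = {
--     "Grapeshot": "storm", "Tendrils of Agony": "storm", "Brain Freeze": "storm",
--     "Empty the Warrens": "storm", "Aetherflux Reservoir": "storm",
--     "Storm-Kiln Artist": "storm",
--     "Thassa's Oracle": "cedh_turbo", "Demonic Consultation": "cedh_turbo",
--     "Tainted Pact": "cedh_turbo", "Ad Nauseam": "cedh_turbo",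
--     "Dockside Extortionist": "cedh_turbo", "Dramatic Reversal": "cedh_turbo",
--     "Isochron Scepter": "cedh_turbo",
--     "Sol Ring": "artifact_ramp", "Mana Crypt": "artifact_ramp",
--     "Mana Vault": "artifact_ramp", "Chrome Mox": "artifact_ramp",
--     "Mox Amber": "artifact_ramp", "Mox Opal": "artifact_ramp",
--     "Mox Diamond": "artifact_ramp", "Thran Dynamo": "artifact_ramp",
--     "Gilded Lotus": "artifact_ramp", "Coalition Relic": "artifact_ramp",
--     "Arcane Signet": "artifact_ramp", "Fellwar Stone": "artifact_ramp",
--     "Mind Stone": "artifact_ramp",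
--     "Muldrotha, the Gravetide": "recursion_graveyard",
--     "Meren of Clan Nel Toth": "recursion_graveyard",
--     "Karador, Ghost Chieftain": "recursion_graveyard",
--     "The Scarab God": "recursion_graveyard", "Reanimate": "recursion_graveyard",
--     "Animate Dead": "recursion_graveyard", "Necromancy": "recursion_graveyard",
--     "Ulrich of the Krallenhorde": "werewolf", "Tovolar, Dire Overlord": "werewolf",
--     "Arlinn Kord": "werewolf", "Kessig Wolf Run": "werewolf",
--     "Immerwolf": "werewolf", "Huntmaster of the Fells": "werewolf",
--     "Sword of Feast and Famine": "voltron", "Sword of Fire and Ice": "voltron",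
--     "Umezawa's Jitte": "voltron", "Shadowspear": "voltron",
--     "Embercleave": "voltron", "Colossus Hammer": "voltron",
--     "Blood Artist": "aristocrats_drain", "Zulaport Cutthroat": "aristocrats_drain",
--     "Cruel Celebrant": "aristocrats_drain", "Syr Konrad, the Grim": "aristocrats_drain",
--     "Bastion of Remembrance": "aristocrats_drain",
-- }
--
-- # (archetype_label, min_matches) in declared priority order.
-- _SELECTION = [
--     ("storm", 1), ("cedh_turbo", 2), ("artifact_ramp", 3),
--     ("recursion_graveyard", 1), ("werewolf", 2), ("voltron", 2),
--     ("aristocrats_drain", 2),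
-- ]
--
--
-- def classify_seat(card_names: list) -> str:
--     """Return the best-matching archetype label for a decklist."""
--     counts = {}
--     for name in set(card_names):
--         label = _CARD_TO_LABEL.get(name)
--         if label is not None:
--             counts[label] = counts.get(label, 0) + 1
--     best_label, best_hits = "unknown", 0
--     for label, thresh in _SELECTION:
--         hits = counts.get(label, 0)
--         if hits >= thresh and hits > best_hits:
--             best_label, best_hits = label, hits
--     return best_label
-- ===== Notes on version B (the rewrite author's own statement) =====
-- stated objective: alternative
-- what changed: Replaces the per-rule set intersections with a flat inverted map (marker card -> its unique archetype label, the marker sets being pairwise disjoint), a single counting pass over the deduplicated card names, and a final selection over (label, threshold) pairs reading the per-label counts.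
import Mathlib
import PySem

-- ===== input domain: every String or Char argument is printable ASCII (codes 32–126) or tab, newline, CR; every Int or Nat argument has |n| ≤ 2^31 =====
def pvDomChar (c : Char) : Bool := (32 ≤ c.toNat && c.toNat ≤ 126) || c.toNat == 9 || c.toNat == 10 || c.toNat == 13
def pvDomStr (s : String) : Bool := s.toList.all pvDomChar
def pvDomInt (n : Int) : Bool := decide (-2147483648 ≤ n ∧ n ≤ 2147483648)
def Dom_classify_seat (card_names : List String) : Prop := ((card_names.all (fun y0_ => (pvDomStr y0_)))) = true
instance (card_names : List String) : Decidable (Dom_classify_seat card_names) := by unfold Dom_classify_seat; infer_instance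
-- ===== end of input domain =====

-- B replaces A's per-rule set intersections by a flat inverted map (marker card → its unique
-- archetype label, the marker sets being pairwise disjoint), one counting pass over the
-- deduplicated names, and a selection pass over (label, threshold) pairs (alternative
-- decomposition, same result).

-- ===== PORT A =====
-- module constant _ARCHETYPE_RULES (marker sets as their literal element lists)
def RULES : List (String × Int × List String) := [
  ("storm", 1, ["Grapeshot", "Tendrils of Agony", "Brain Freeze", "Empty the Warrens", "Aetherflux Reservoir", "Storm-Kiln Artist"]),
  ("cedh_turbo", 2, ["Thassa's Oracle", "Demonic Consultation", "Tainted Pact", "Ad Nauseam", "Dockside Extortionist", "Dramatic Reversal", "Isochron Scepter"]),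
  ("artifact_ramp", 3, ["Sol Ring", "Mana Crypt", "Mana Vault", "Chrome Mox", "Mox Amber", "Mox Opal", "Mox Diamond", "Thran Dynamo", "Gilded Lotus", "Coalition Relic", "Arcane Signet", "Fellwar Stone", "Mind Stone"]),
  ("recursion_graveyard", 1, ["Muldrotha, the Gravetide", "Meren of Clan Nel Toth", "Karador, Ghost Chieftain", "The Scarab God", "Reanimate", "Animate Dead", "Necromancy"]),
  ("werewolf", 2, ["Ulrich of the Krallenhorde", "Tovolar, Dire Overlord", "Arlinn Kord", "Kessig Wolf Run", "Immerwolf", "Huntmaster of the Fells"]),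
  ("voltron", 2, ["Sword of Feast and Famine", "Sword of Fire and Ice", "Umezawa's Jitte", "Shadowspear", "Embercleave", "Colossus Hammer"]),
  ("aristocrats_drain", 2, ["Blood Artist", "Zulaport Cutthroat", "Cruel Celebrant", "Syr Konrad, the Grim", "Bastion of Remembrance"])]

def classify_seat (card_names : List String) : String :=
  let names : PySem.Set String := PySem.Set.ofList card_names
  (RULES.foldl (fun (best : String × Int) r =>
    let hits : Int := PySem.Set.len (PySem.Set.inter names r.2.2)
    if hits ≥ r.2.1 ∧ hits > best.2 then (r.1, hits) else best) ("unknown", 0)).1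

-- ===== PORT B =====
-- Source B's module constant _CARD_TO_LABEL: a flat dict literal, marker card → archetype label
def CARD_TO_LABEL : PySem.Dict String String := PySem.Dict.mk [
  ("Grapeshot", "storm"), ("Tendrils of Agony", "storm"), ("Brain Freeze", "storm"),
  ("Empty the Warrens", "storm"), ("Aetherflux Reservoir", "storm"), ("Storm-Kiln Artist", "storm"),
  ("Thassa's Oracle", "cedh_turbo"), ("Demonic Consultation", "cedh_turbo"), ("Tainted Pact", "cedh_turbo"),
  ("Ad Nauseam", "cedh_turbo"), ("Dockside Extortionist", "cedh_turbo"), ("Dramatic Reversal", "cedh_turbo"),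
  ("Isochron Scepter", "cedh_turbo"),
  ("Sol Ring", "artifact_ramp"), ("Mana Crypt", "artifact_ramp"), ("Mana Vault", "artifact_ramp"),
  ("Chrome Mox", "artifact_ramp"), ("Mox Amber", "artifact_ramp"), ("Mox Opal", "artifact_ramp"),
  ("Mox Diamond", "artifact_ramp"), ("Thran Dynamo", "artifact_ramp"), ("Gilded Lotus", "artifact_ramp"),
  ("Coalition Relic", "artifact_ramp"), ("Arcane Signet", "artifact_ramp"), ("Fellwar Stone", "artifact_ramp"),
  ("Mind Stone", "artifact_ramp"),
  ("Muldrotha, the Gravetide", "recursion_graveyard"), ("Meren of Clan Nel Toth", "recursion_graveyard"),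
  ("Karador, Ghost Chieftain", "recursion_graveyard"), ("The Scarab God", "recursion_graveyard"),
  ("Reanimate", "recursion_graveyard"), ("Animate Dead", "recursion_graveyard"), ("Necromancy", "recursion_graveyard"),
  ("Ulrich of the Krallenhorde", "werewolf"), ("Tovolar, Dire Overlord", "werewolf"),
  ("Arlinn Kord", "werewolf"), ("Kessig Wolf Run", "werewolf"),
  ("Immerwolf", "werewolf"), ("Huntmaster of the Fells", "werewolf"),
  ("Sword of Feast and Famine", "voltron"), ("Sword of Fire and Ice", "voltron"),
  ("Umezawa's Jitte", "voltron"), ("Shadowspear", "voltron"),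
  ("Embercleave", "voltron"), ("Colossus Hammer", "voltron"),
  ("Blood Artist", "aristocrats_drain"), ("Zulaport Cutthroat", "aristocrats_drain"),
  ("Cruel Celebrant", "aristocrats_drain"), ("Syr Konrad, the Grim", "aristocrats_drain"),
  ("Bastion of Remembrance", "aristocrats_drain")]

-- Source B's module constant _SELECTION: (label, threshold) pairs in declared priority order
def SELECTION : List (String × Int) := [
  ("storm", 1), ("cedh_turbo", 2), ("artifact_ramp", 3),
  ("recursion_graveyard", 1), ("werewolf", 2), ("voltron", 2), ("aristocrats_drain", 2)]

-- counting pass: for each distinct name, look the card up; counts[label] += 1 on a hit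
def countsOf (card_names : List String) : PySem.Dict String Int :=
  (PySem.Set.ofList card_names).foldl
    (fun d n =>
      match PySem.Dict.get? CARD_TO_LABEL n with
      | some label => PySem.Dict.modify d label 0 (· + 1)
      | none => d)
    PySem.Dict.empty

-- selection loop over (label, threshold) pairs (Source B's final for-loop, as structural recursion)
def pickBest (counts : PySem.Dict String Int) : List (String × Int) → String × Int → String
  | [], best => best.1
  | (label, thresh) :: rest, best =>
      let hits := PySem.Dict.getD counts label 0
      if hits ≥ thresh ∧ hits > best.2 then pickBest counts rest (label, hits)
      else pickBest counts rest best

def classify_seat_alt (card_names : List String) : String :=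
  pickBest (countsOf card_names) SELECTION ("unknown", 0)

-- ===== PRECONDITION & SPEC =====
def Spec_classify_seat (card_names : List String) (out : String) : Prop := out = classify_seat_alt card_names
instance (card_names : List String) (out : String) : Decidable (Spec_classify_seat card_names out) := by unfold Spec_classify_seat; infer_instance

-- ===== CLAIM (what is proved, stated in full; the proofs are below) =====
def Claim_equal_classify_seat : Prop := ∀ (card_names : List String), Dom_classify_seat card_names → Spec_classify_seat card_names (classify_seat card_names)

-- ===== LEMMAS AND PROOFS =====

-- the counting pass leaves counts[lab] = Σ over the names of a lookup indicator
lemma counts_getD_sum (lab : String) :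
    ∀ (L : List String) (d : PySem.Dict String Int),
    PySem.Dict.getD (L.foldl
        (fun (d : PySem.Dict String Int) n =>
          match PySem.Dict.get? CARD_TO_LABEL n with
          | some label => PySem.Dict.modify d label 0 (· + 1)
          | none => d) d) lab 0
      = PySem.Dict.getD d lab 0
        + (L.map (fun n => if PySem.Dict.get? CARD_TO_LABEL n = some lab then (1 : Int) else 0)).sum := by
  intro L
  induction L with
  | nil => intro d; simp
  | cons n rest ih =>
      intro d
      simp only [List.foldl_cons, List.map_cons, List.sum_cons]
      cases hg : PySem.Dict.get? CARD_TO_LABEL n with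
      | none => simp [ih]
      | some l =>
          simp only [hg]
          rw [ih, PySem.Dict.getD_modify]
          by_cases h : lab = l
          · subst h; simp; ring
          · have hne : ¬ (PySem.Dict.get? CARD_TO_LABEL n = some lab) := by
              rw [hg]; exact fun hc => h (Option.some.inj hc).symm
            have h' : ¬ l = lab := fun hc => h hc.symm
            simp [h, h']

set_option maxRecDepth 20000 in
lemma keys_nodup : (PySem.Dict.keys CARD_TO_LABEL).Nodup := by decide

-- the lookup succeeds with a rule's label exactly on that rule's marker cards
set_option maxRecDepth 20000 in
set_option maxHeartbeats 4000000 in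
lemma lookup_iff_marker (n : String) (lab : String) (t : Int) (ms : List String)
    (hmem : (lab, t, ms) ∈ RULES) :
    (PySem.Dict.get? CARD_TO_LABEL n = some lab) ↔ n ∈ ms := by
  rw [PySem.Dict.get?_eq_some_iff_mem_items CARD_TO_LABEL n lab keys_nodup]
  simp only [RULES, List.mem_cons, List.not_mem_nil, or_false, Prod.mk.injEq] at hmem
  rcases hmem with ⟨rfl, rfl, rfl⟩|⟨rfl, rfl, rfl⟩|⟨rfl, rfl, rfl⟩|⟨rfl, rfl, rfl⟩|⟨rfl, rfl, rfl⟩|⟨rfl, rfl, rfl⟩|⟨rfl, rfl, rfl⟩ <;>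
    simp [CARD_TO_LABEL, List.mem_cons, Prod.mk.injEq]

-- a 0/1 indicator sum counts the filtered elements
lemma sum_ite_len (ms : List String) : ∀ (l : List String),
    (l.map (fun n => if n ∈ ms then (1 : Int) else 0)).sum
      = ((l.filter (fun x => decide (x ∈ ms))).length : Int) := by
  intro l
  induction l with
  | nil => simp
  | cons a l ih => by_cases h : a ∈ ms <;> simp [h, ih] <;> omega

-- per rule: B's count equals A's intersection size
lemma hits_eq (cs : List String) (lab : String) (t : Int) (ms : List String)
    (hmem : (lab, t, ms) ∈ RULES) :
    PySem.Dict.getD (countsOf cs) lab 0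
      = PySem.Set.len (PySem.Set.inter (PySem.Set.ofList cs) ms) := by
  unfold countsOf
  rw [counts_getD_sum]
  have hpt : (fun n => if PySem.Dict.get? CARD_TO_LABEL n = some lab then (1 : Int) else 0)
      = fun n => if n ∈ ms then (1 : Int) else 0 := by
    funext n
    by_cases h : n ∈ ms
    · simp [h, (lookup_iff_marker n lab t ms hmem).mpr h]
    · have : ¬ (PySem.Dict.get? CARD_TO_LABEL n = some lab) :=
        fun hc => h ((lookup_iff_marker n lab t ms hmem).mp hc)
      simp [h, this]
  rw [hpt, sum_ite_len]
  simp [PySem.Set.len, PySem.Set.inter]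

-- B's selection recursion over (label, threshold) pairs is A's fold over the full rules
lemma pickBest_eq_foldl (cs : List String) :
    ∀ (rs : List (String × Int × List String)),
    (∀ r ∈ rs, ∃ t, (r.1, t, r.2.2) ∈ RULES ∧ t = r.2.1) →
    ∀ (best : String × Int),
    pickBest (countsOf cs) (rs.map (fun r => (r.1, r.2.1))) best
      = (rs.foldl (fun (best : String × Int) r =>
          let hits : Int := PySem.Set.len (PySem.Set.inter (PySem.Set.ofList cs) r.2.2)
          if hits ≥ r.2.1 ∧ hits > best.2 then (r.1, hits) else best) best).1 := by
  intro rs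
  induction rs with
  | nil => intro _ best; rfl
  | cons r rest ih =>
      intro h best
      obtain ⟨t, hmem, rfl⟩ := h r (List.mem_cons_self ..)
      simp only [List.map_cons, List.foldl_cons, pickBest]
      rw [hits_eq cs r.1 r.2.1 r.2.2 hmem]
      split_ifs with hc
      · exact ih (fun r hr => h r (List.mem_cons_of_mem _ hr)) _
      · exact ih (fun r hr => h r (List.mem_cons_of_mem _ hr)) _

-- ===== VERDICT (by name: the statement is the Claim_ definition above) =====
theorem classify_seat_spec : Claim_equal_classify_seat := by
  intro cs _
  unfold Spec_classify_seat classify_seat classify_seat_alt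
  have hsel : SELECTION = RULES.map (fun r => (r.1, r.2.1)) := by decide
  rw [hsel, pickBest_eq_foldl cs RULES (fun r hr => ⟨r.2.1, by simpa using hr, rfl⟩)]
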